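-- pv_equiv track=rewrite | github.com/shhuan1989/algorithms | codechef/JAN21B_FAIRELCT.py | solve
-- ===== SOURCE A (Python) =====
-- def solve(N, M, A, B):
--     sa, sb = sum(A), sum(B)
--     if sa > sb:
--         return 0
--
--     A.sort()
--     B.sort(reverse=True)
--     ans = 0
--     ai, bi = 0, 0
--     while ai < N and bi < M:
--         diff = A[ai] - B[bi]
--         if diff >= 0:
--             break
--
--         sa -= diff
--         sb += diff
--         ans += 1
--         if sa > sb:
--             break
--         ai += 1
--         bi += 1
--
--     return ans if sa > sb else -1
-- ===== SOURCE B (Python) =====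
-- def solve(N, M, A, B):
--     sa, sb = sum(A), sum(B)
--     if sa > sb:
--         return 0
--     A.sort()
--     B.sort(reverse=True)
--     n = max(min(N, M), 0)
--     prefix = []
--     s = 0
--     for a, b in zip(A[:n], B[:n]):
--         g = b - a
--         if g <= 0:
--             break
--         s += g
--         prefix.append(s)
--     c = sum(1 for p in prefix if 2 * p <= sb - sa)
--     return c + 1 if c < len(prefix) else -1
-- ===== Notes on version B (the rewrite author's own statement) =====
-- stated objective: alternative
-- what changed: Replaces A's fused while-loop (running sa/sb, two indices, two break conditions) with two separate phases: build the truncated positive-gain prefix-sum table over zip of the sorted slices, then obtain the answer as a count of prefix sums not exceeding the threshold sb-sa.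
-- crash fix: When sum(A) <= sum(B), min(N,M) exceeds both list lengths, every sorted pair has a positive gain and twice the total gain does not reach sum(B)-sum(A), A's loop runs off the end and raises IndexError; B returns -1 (no swap sequence makes A's sum exceed B's). — e.g. on solve(2, 2, [0], [10, 10]): A raises IndexError, B returns -1
import Mathlib
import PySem

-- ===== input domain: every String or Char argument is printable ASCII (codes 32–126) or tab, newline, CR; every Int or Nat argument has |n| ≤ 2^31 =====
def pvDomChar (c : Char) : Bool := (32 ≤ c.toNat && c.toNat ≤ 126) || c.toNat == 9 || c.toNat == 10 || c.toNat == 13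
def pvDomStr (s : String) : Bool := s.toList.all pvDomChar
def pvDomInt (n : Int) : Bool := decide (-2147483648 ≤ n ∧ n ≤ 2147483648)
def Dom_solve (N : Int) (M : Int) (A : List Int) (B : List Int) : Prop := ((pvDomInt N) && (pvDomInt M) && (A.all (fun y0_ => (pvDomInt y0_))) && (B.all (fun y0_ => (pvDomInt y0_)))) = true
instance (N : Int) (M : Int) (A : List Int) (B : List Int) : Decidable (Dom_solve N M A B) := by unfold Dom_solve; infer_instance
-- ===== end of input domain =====

-- B replaces A's fused while-loop with a prefix-sum table plus a threshold count; both sort the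
-- argument lists in place in Python (same mutation), and the equivalence proved here is about the
-- return value.

-- ===== PORT A =====
-- A's while loop: state (sa, sb, ans, ai, bi); fuel bounds the iteration count (the loop runs at
-- most (min N M) iterations since ai = bi increase together); pyGetD's default is never read
-- under Pre_solve (exactly where Python would read out of range, A raises, and Pre_ excludes it).
def solveLoopA (As Bs : List Int) (N M : Int) :
    Nat → Int → Int → Int → Int → Int → Int × Int × Int
  | 0, sa, sb, ans, _, _ => (sa, sb, ans)
  | fuel + 1, sa, sb, ans, ai, bi =>
    if ai < N ∧ bi < M then
      let diff := PySem.List.pyGetD As ai 0 - PySem.List.pyGetD Bs bi 0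
      if diff ≥ 0 then (sa, sb, ans)
      else
        let sa' := sa - diff
        let sb' := sb + diff
        let ans' := ans + 1
        if sa' > sb' then (sa', sb', ans')
        else solveLoopA As Bs N M fuel sa' sb' ans' (ai + 1) (bi + 1)
    else (sa, sb, ans)

def solve (N : Int) (M : Int) (A : List Int) (B : List Int) : Int :=
  let sa := A.sum
  let sb := B.sum
  if sa > sb then 0
  else
    let As := PySem.List.sorted A (fun x => x) false
    let Bs := PySem.List.sorted B (fun x => x) true
    let r := solveLoopA As Bs N M (min N M).toNat sa sb 0 0 0
    if r.1 > r.2.1 then r.2.2 else -1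

-- ===== PORT B =====
-- prefix-sum table of the gains b - a, truncated at the first non-positive gain
def solvePrefix : List (Int × Int) → Int → List Int
  | [], _ => []
  | (a, b) :: rest, s =>
    let g := b - a
    if g ≤ 0 then []
    else (s + g) :: solvePrefix rest (s + g)

def solve_alt (N : Int) (M : Int) (A : List Int) (B : List Int) : Int :=
  let sa := A.sum
  let sb := B.sum
  if sa > sb then 0
  else
    let As := PySem.List.sorted A (fun x => x) false
    let Bs := PySem.List.sorted B (fun x => x) true
    let n := max (min N M) 0
    let pre := solvePrefix ((PySem.List.slice As none (some n)).zip
                            (PySem.List.slice Bs none (some n))) 0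
    let c := pre.countP (fun p => decide (2 * p ≤ sb - sa))
    if (c : Int) < pre.length then (c : Int) + 1 else -1

-- ===== PRECONDITION & SPEC =====
-- per-pair gains of the sorted matching (A ascending against B descending)
def pvGains (A B : List Int) : List Int :=
  ((PySem.List.sorted A (fun x => x) false).zip (PySem.List.sorted B (fun x => x) true)).map
    (fun p => p.2 - p.1)

-- When sum(A) <= sum(B), min(N,M) exceeds both list lengths, every sorted pair has a positive
-- gain and twice the total gain does not reach sum(B)-sum(A), A's loop runs off the end and
-- raises IndexError; B returns -1 there.
def Raises_solve (N : Int) (M : Int) (A : List Int) (B : List Int) : Prop :=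
  A.sum ≤ B.sum ∧ (min (A.length : Int) (B.length : Int)) < min N M ∧
    (∀ g ∈ pvGains A B, 0 < g) ∧ 2 * (pvGains A B).sum ≤ B.sum - A.sum
instance (N : Int) (M : Int) (A : List Int) (B : List Int) : Decidable (Raises_solve N M A B) := by
  unfold Raises_solve; infer_instance

-- Pre_solve excludes exactly the inputs on which A raises IndexError (the condition above);
-- everywhere A returns a value, Pre_solve holds.
def Pre_solve (N : Int) (M : Int) (A : List Int) (B : List Int) : Prop :=
  ¬ Raises_solve N M A B
instance (N : Int) (M : Int) (A : List Int) (B : List Int) : Decidable (Pre_solve N M A B) := by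
  unfold Pre_solve; infer_instance

def pvWitness_solve : Int × Int × List Int × List Int := (2, 2, [1, 2], [3, 4])

def pvRaiseWitness_solve : Int × Int × List Int × List Int := (2, 2, [0], [10, 10])
def pvRaiseWitnessOut_solve : Int := -1

def Spec_solve (N : Int) (M : Int) (A : List Int) (B : List Int) (out : Int) : Prop := out = solve_alt N M A B
instance (N : Int) (M : Int) (A : List Int) (B : List Int) (out : Int) : Decidable (Spec_solve N M A B out) := by unfold Spec_solve; infer_instance

-- ===== CLAIM (what is proved, stated in full; the proofs are below) =====
def Claim_equal_solve : Prop := ∀ (N : Int) (M : Int) (A : List Int) (B : List Int), Dom_solve N M A B → Pre_solve N M A B → Spec_solve N M A B (solve N M A B)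

def Claim_raises_solve : Prop := (∀ (N : Int) (M : Int) (A : List Int) (B : List Int), Dom_solve N M A B → Raises_solve N M A B → ¬ Pre_solve N M A B) ∧ (Dom_solve (pvRaiseWitness_solve.1) (pvRaiseWitness_solve.2.1) (pvRaiseWitness_solve.2.2.1) (pvRaiseWitness_solve.2.2.2) ∧ Raises_solve (pvRaiseWitness_solve.1) (pvRaiseWitness_solve.2.1) (pvRaiseWitness_solve.2.2.1) (pvRaiseWitness_solve.2.2.2) ∧ solve_alt (pvRaiseWitness_solve.1) (pvRaiseWitness_solve.2.1) (pvRaiseWitness_solve.2.2.1) (pvRaiseWitness_solve.2.2.2) = pvRaiseWitnessOut_solve)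

-- ===== LEMMAS AND PROOFS =====

-- every prefix sum produced from start value s is strictly greater than s
theorem solvePrefix_gt (l : List (Int × Int)) (s : Int) :
    ∀ x ∈ solvePrefix l s, s < x := by
  induction l generalizing s with
  | nil => simp [solvePrefix]
  | cons p rest ih =>
    intro x hx
    obtain ⟨a, b⟩ := p
    simp only [solvePrefix] at hx
    split at hx
    · simp at hx
    · rename_i hg
      rcases List.mem_cons.mp hx with h | h
      · omega
      · have := ih (s + (b - a)) x h
        omega

-- the list-level form of A's loop
def solveLoopL : List (Int × Int) → Int → Int → Int → Int × Int × Int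
  | [], sa, sb, ans => (sa, sb, ans)
  | (a, b) :: rest, sa, sb, ans =>
    let diff := a - b
    if diff ≥ 0 then (sa, sb, ans)
    else
      let sa' := sa - diff
      let sb' := sb + diff
      if sa' > sb' then (sa', sb', ans + 1)
      else solveLoopL rest sa' sb' (ans + 1)

-- prefix sum of the first i gains of the pair list z
def pvP (z : List (Int × Int)) (i : Nat) : Int :=
  ((z.take i).map (fun p => p.2 - p.1)).sum

-- "index i is reachable by A's loop": every earlier step was in range, had a positive gain,
-- and left the running sums with sa ≤ sb (threshold form)
def pvGood (z : List (Int × Int)) (t : Int) (i : Nat) : Prop :=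
  ∀ j < i, j < z.length ∧ 0 < (z.getD j (0, 0)).2 - (z.getD j (0, 0)).1 ∧ 2 * pvP z (j + 1) ≤ t

theorem pvGood_le (z : List (Int × Int)) (t : Int) (i : Nat) (h : pvGood z t i) :
    i ≤ z.length := by
  by_contra hc
  exact absurd (h z.length (by omega)).1 (lt_irrefl _)

theorem pvP_succ (z : List (Int × Int)) (i : Nat) (hi : i < z.length) :
    pvP z (i + 1) = pvP z i + (z[i].2 - z[i].1) := by
  unfold pvP
  rw [List.take_add_one, List.getElem?_eq_getElem hi, Option.toList_some, List.map_append,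
    List.sum_append, List.map_singleton, List.sum_singleton]

-- the indexed, fueled loop of A computes the list-level loop on the zipped truncated lists,
-- at every index its loop actually reaches
theorem loopA_eq_loopL (As Bs : List Int) (N M sa0 sb0 : Int)
    (n : Nat) (hn : (n : Int) = max (min N M) 0)
    (z : List (Int × Int)) (hz : z = (As.take n).zip (Bs.take n))
    (hglob : ¬ ((z.length : Int) < min N M ∧ pvGood z (sb0 - sa0) z.length)) :
    ∀ (f i : Nat) (ans : Int), pvGood z (sb0 - sa0) i → min N M - (i : Int) ≤ (f : Int) →
      solveLoopA As Bs N M f (sa0 + pvP z i) (sb0 - pvP z i) ans i i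
        = solveLoopL (z.drop i) (sa0 + pvP z i) (sb0 - pvP z i) ans := by
  have hlen : z.length ≤ n := by
    subst hz
    simp only [List.length_zip, List.length_take]
    omega
  intro f
  induction f with
  | zero =>
    intro i ans _ hf
    have hdrop : z.drop i = [] := by
      apply List.drop_eq_nil_of_le
      have : (n : Int) ≤ (i : Int) := by omega
      omega
    rw [hdrop]
    rfl
  | succ f ih =>
    intro i ans hGood hf
    by_cases h1 : (i : Int) < N ∧ (i : Int) < M
    · have hi' : (i : Int) < min N M := by omega
      have hile : i ≤ z.length := pvGood_le z _ i hGood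
      by_cases hiL : i < z.length
      · have hiA : i < As.length := by
          subst hz
          simp only [List.length_zip, List.length_take] at hiL
          omega
        have hiB : i < Bs.length := by
          subst hz
          simp only [List.length_zip, List.length_take] at hiL
          omega
        have hget : z[i] = (As[i], Bs[i]) := by
          subst hz
          simp only [List.getElem_zip, List.getElem_take]
        have hdrop := List.drop_eq_getElem_cons hiL
        rw [hdrop, hget]
        simp only [solveLoopA, solveLoopL, h1, and_self, if_true,
          PySem.List.pyGetD_natCast, List.getD_eq_getElem?_getD, List.getElem?_eq_getElem hiA,
          List.getElem?_eq_getElem hiB, Option.getD_some]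
        by_cases hba : As[i] - Bs[i] ≥ 0
        · rw [if_pos hba, if_pos hba]
        · rw [if_neg hba, if_neg hba]
          have hP : pvP z (i + 1) = pvP z i + (Bs[i] - As[i]) := by
            rw [pvP_succ z i hiL, hget]
          by_cases hbr : sa0 + pvP z i - (As[i] - Bs[i]) > sb0 - pvP z i + (As[i] - Bs[i])
          · rw [if_pos hbr, if_pos hbr]
          · rw [if_neg hbr, if_neg hbr]
            have hGood' : pvGood z (sb0 - sa0) (i + 1) := by
              intro j hj
              by_cases hji : j < i
              · exact hGood j hji
              · have hji' : j = i := by omega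
                subst hji'
                refine ⟨hiL, ?_, ?_⟩
                · rw [List.getD_eq_getElem?_getD, List.getElem?_eq_getElem hiL, hget]
                  simp only [Option.getD_some]
                  omega
                · omega
            have hrec := ih (i + 1) (ans + 1) hGood' (by push_cast; omega)
            have e1 : sa0 + pvP z i - (As[i] - Bs[i]) = sa0 + pvP z (i + 1) := by
              rw [hP]; ring
            have e2 : sb0 - pvP z i + (As[i] - Bs[i]) = sb0 - pvP z (i + 1) := by
              rw [hP]; ring
            rw [e1, e2]
            push_cast at hrec ⊢
            rw [hrec]
      · have hiL' : i = z.length := by omega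
        exact absurd ⟨by omega, by rw [← hiL']; exact hGood⟩ hglob
    · have hdrop : z.drop i = [] := by
        apply List.drop_eq_nil_of_le
        have : (n : Int) ≤ (i : Int) := by omega
        omega
      rw [hdrop]
      simp only [solveLoopA, solveLoopL]
      rw [if_neg h1]

-- core equivalence: A's post-processed loop result = B's count over the prefix table,
-- for any start offset s with 2*s ≤ sb0 - sa0 and any swap count k
theorem core (sa0 sb0 : Int) (l : List (Int × Int)) (s k : Int)
    (hs : 2 * s ≤ sb0 - sa0) :
    (let r := solveLoopL l (sa0 + s) (sb0 - s) k
     if r.1 > r.2.1 then r.2.2 else -1)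
    = (let pre := solvePrefix l s
       let c := pre.countP (fun p => decide (2 * p ≤ sb0 - sa0))
       if (c : Int) < pre.length then (c : Int) + k + 1 else -1) := by
  induction l generalizing s k with
  | nil =>
    simp only [solveLoopL, solvePrefix, List.countP_nil, List.length_nil]
    have h1 : ¬ (sa0 + s > sb0 - s) := by omega
    simp [h1]
  | cons p rest ih =>
    obtain ⟨a, b⟩ := p
    simp only [solveLoopL, solvePrefix]
    by_cases hg : a - b ≥ 0
    · have hba : b ≤ a := by omega
      have hg' : b - a ≤ 0 := by omega
      have h1 : ¬ (sa0 + s > sb0 - s) := by omega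
      simp [hba, hg', h1]
    · have hg' : ¬ (b - a ≤ 0) := by omega
      rw [if_neg hg, if_neg hg']
      by_cases hbr : sa0 + s - (a - b) > sb0 - s + (a - b)
      · have hhead : ¬ (2 * (s + (b - a)) ≤ sb0 - sa0) := by omega
        have hcnt : (solvePrefix rest (s + (b - a))).countP
            (fun p => decide (2 * p ≤ sb0 - sa0)) = 0 := by
          rw [List.countP_eq_zero]
          intro x hx
          have := solvePrefix_gt rest (s + (b - a)) x hx
          simp only [decide_eq_true_eq]
          omega
        simp [hbr, hhead, hcnt]
      · have hs' : 2 * (s + (b - a)) ≤ sb0 - sa0 := by omega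
        have heq1 : sa0 + s - (a - b) = sa0 + (s + (b - a)) := by ring
        have heq2 : sb0 - s + (a - b) = sb0 - (s + (b - a)) := by ring
        have hbr' : ¬ (sa0 + (s + (b - a)) > sb0 - (s + (b - a))) := by omega
        have hih := ih (s + (b - a)) (k + 1) hs'
        simp only [heq1, heq2]
        rw [if_neg hbr']
        simp only at hih
        rw [hih]
        simp only [List.countP_cons, List.length_cons, hs',
          if_pos, decide_true]
        split <;> split <;> push_cast at * <;> omega

-- under Pre_solve (and sum A ≤ sum B), A's loop never reaches an out-of-range index
theorem pre_no_overrun (N M : Int) (A B : List Int) (hpre : Pre_solve N M A B)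
    (h0 : ¬ A.sum > B.sum)
    (n : Nat) (hn : (n : Int) = max (min N M) 0)
    (z : List (Int × Int))
    (hz : z = ((PySem.List.sorted A (fun x => x) false).take n).zip
              ((PySem.List.sorted B (fun x => x) true).take n)) :
    ¬ ((z.length : Int) < min N M ∧ pvGood z (B.sum - A.sum) z.length) := by
  rintro ⟨hL, hGood⟩
  apply hpre
  set As := PySem.List.sorted A (fun x => x) false with hAs
  set Bs := PySem.List.sorted B (fun x => x) true with hBs
  have hlA : As.length = A.length := PySem.List.length_sorted ..
  have hlB : Bs.length = B.length := PySem.List.length_sorted ..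
  have hLn : z.length < n := by
    have hLlen : z.length ≤ n := by
      subst hz; simp only [List.length_zip, List.length_take]; omega
    by_contra hc
    have : z.length = n := by omega
    omega
  have hLeq : z.length = min As.length Bs.length := by
    subst hz
    simp only [List.length_zip, List.length_take] at hLn ⊢
    omega
  have hzfull : z = As.zip Bs := by
    apply List.ext_getElem
    · rw [hLeq]; simp [List.length_zip]
    · intro j hj _
      subst hz
      simp only [List.getElem_zip, List.getElem_take]
  refine ⟨by omega, by rw [← hlA, ← hlB]; omega, ?_, ?_⟩
  · intro g hg
    rw [pvGains, ← hAs, ← hBs, ← hzfull] at hg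
    obtain ⟨p, hp, hpe⟩ := List.mem_map.mp hg
    obtain ⟨j, hjlt, hje⟩ := List.getElem_of_mem hp
    have := (hGood j (by omega)).2.1
    rw [List.getD_eq_getElem?_getD, List.getElem?_eq_getElem hjlt, hje] at this
    simp only [Option.getD_some] at this
    omega
  · have hsum : (pvGains A B).sum = pvP z z.length := by
      rw [pvGains, ← hAs, ← hBs, ← hzfull, pvP, List.take_length]
    rw [hsum]
    rcases Nat.eq_zero_or_pos z.length with hL0 | hL0
    · rw [hL0]
      simp only [pvP, List.take_zero, List.map_nil, List.sum_nil]
      omega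
    · have := (hGood (z.length - 1) (by omega)).2.2
      have he : z.length - 1 + 1 = z.length := by omega
      rw [he] at this
      omega

-- ===== VERDICT (by name: the statement is the Claim_ definition above) =====
theorem solve_spec : Claim_equal_solve := by
  intro N M A B _ hpre
  unfold Spec_solve solve solve_alt
  by_cases h0 : A.sum > B.sum
  · simp [h0]
  · simp only [h0, if_false]
    set As := PySem.List.sorted A (fun x => x) false with hAs
    set Bs := PySem.List.sorted B (fun x => x) true with hBs
    set n : Nat := (max (min N M) 0).toNat with hn
    have hnI : (n : Int) = max (min N M) 0 := by omega
    set z := (As.take n).zip (Bs.take n) with hz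
    have hglob := pre_no_overrun N M A B hpre h0 n hnI z (by rw [hz, hAs, hBs])
    have hloop := loopA_eq_loopL As Bs N M A.sum B.sum n hnI z rfl hglob
      (min N M).toNat 0 0 (by intro j hj; omega) (by push_cast; omega)
    simp only [pvP, List.take_zero, List.map_nil, List.sum_nil, Int.add_zero, Int.sub_zero,
      List.drop_zero, Nat.cast_zero] at hloop
    have hslice : ∀ (xs : List Int),
        PySem.List.slice xs none (some (max (min N M) 0)) = xs.take n := by
      intro xs
      have h := PySem.List.slice_to_natCast (b := n) (xs := xs)
      rw [hnI] at h
      exact h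
    have hcore := core A.sum B.sum z 0 0 (by omega)
    simp only [Int.add_zero, Int.sub_zero] at hcore
    rw [hloop, hslice As, hslice Bs]
    simpa using hcore

theorem solve_raises : Claim_raises_solve := by
  unfold Claim_raises_solve
  exact ⟨fun N M A B _ hr hp => hp hr, by decide⟩

-- self-check: the raise witness is indeed outside Pre_solve
theorem pvRaiseWitness_outside_pre_ok :
    ¬ Pre_solve (pvRaiseWitness_solve.1) (pvRaiseWitness_solve.2.1)
      (pvRaiseWitness_solve.2.2.1) (pvRaiseWitness_solve.2.2.2) :=
  solve_raises.1 _ _ _ _ (by decide) (by decide)
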